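-- pv_equiv track=rewrite | github.com/JeangyuHeo/Algorithm | 구현/프로그래머스_인사고과.py | solution
-- ===== SOURCE A (Python) =====
-- def solution(scores):
--
--     if len(list(filter(lambda x: x[0] > scores[0][0] and x[1] > scores[0][1], scores[1:]))) != 0:
--         return -1
--
--     answer = 1
--     wanho_score = scores[0][0] + scores[0][1]
--
--     scores.sort(key = lambda x: (-x[0], x[1]))
--
--     max_num = 0
--
--     for score1, score2 in scores:
--         if max_num <= score2:
--             if wanho_score < score1 + score2:
--                 answer += 1
--             max_num = score2
--
--     return answer
-- ===== SOURCE B (Python) =====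
-- def solution(scores):
--     first = scores[0]
--     if any(x[0] > first[0] and x[1] > first[1] for x in scores[1:]):
--         return -1
--     wanho = first[0] + first[1]
--     answer = 1
--     for p in scores:
--         # highest second score among people with a strictly higher first score
--         # (floored at 0, matching A's running max that starts at 0)
--         best = 0
--         for q in scores:
--             if q[0] > p[0] and q[1] > best:
--                 best = q[1]
--         if best <= p[1] and wanho < p[0] + p[1]:
--             answer += 1
--     return answer
-- ===== Notes on version B (the rewrite author's own statement) =====
-- stated objective: alternative
-- what changed: Drops A's sort-then-running-max scheme entirely: B counts, by a direct quadratic dominator scan, the people nobody strictly beats on both scores (with second score >= 0, as A's running max starts at 0) whose total exceeds the first person's; B does not mutate the argument (A sorts it in place).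
-- outside the precondition, e.g. on solution([]): A raises IndexError, B raises IndexError; on solution([[1, 2], [3]]): A raises IndexError, B raises IndexError; on solution([[5, 5], [1, 2, 9]]): A raises ValueError, B returns 1
import Mathlib
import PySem

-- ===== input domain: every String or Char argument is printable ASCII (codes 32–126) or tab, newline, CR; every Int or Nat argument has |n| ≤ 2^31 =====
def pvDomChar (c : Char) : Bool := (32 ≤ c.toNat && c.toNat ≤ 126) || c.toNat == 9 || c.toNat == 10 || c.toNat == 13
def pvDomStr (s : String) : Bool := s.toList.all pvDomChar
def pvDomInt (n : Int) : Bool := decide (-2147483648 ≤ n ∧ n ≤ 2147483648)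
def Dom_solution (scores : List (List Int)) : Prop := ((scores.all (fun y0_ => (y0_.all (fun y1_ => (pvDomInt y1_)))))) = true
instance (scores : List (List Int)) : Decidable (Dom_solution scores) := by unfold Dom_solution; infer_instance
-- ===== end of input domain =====

-- B replaces A's sort + running-max pass by a direct quadratic dominator scan (no sort);
-- same return value; A sorts the argument in place, B does not mutate it (return-value equivalence only).


-- shared row accessors: inside Pre_ every unpacked row has length exactly 2, where these are exact x[0] / x[1]
def pvFst (s : List Int) : Int := s.headD 0
def pvSnd (s : List Int) : Int := (s.drop 1).headD 0

-- ===== PORT A =====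
def solution (scores : List (List Int)) : Int :=
  let h := scores.headD []
  -- len(list(filter(lambda x: x[0] > scores[0][0] and x[1] > scores[0][1], scores[1:]))) != 0
  if ((scores.drop 1).filter
        (fun x => decide (pvFst x > pvFst h) && decide (pvSnd x > pvSnd h))).length ≠ 0 then
    -1
  else
    let wanho : Int := pvFst h + pvSnd h
    let sorted := PySem.List.sorted2 scores (fun x => -(pvFst x)) (fun x => pvSnd x)
    -- for score1, score2 in scores: running state (answer, max_num)
    (sorted.foldl
      (fun (st : Int × Int) s =>
        if st.2 ≤ pvSnd s then
          (if wanho < pvFst s + pvSnd s then st.1 + 1 else st.1, pvSnd s)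
        else st)
      (1, 0)).1

-- ===== PORT B =====
def solution_alt (scores : List (List Int)) : Int :=
  let first := scores.headD []
  if (scores.drop 1).any
        (fun x => decide (pvFst x > pvFst first) && decide (pvSnd x > pvSnd first)) then
    -1
  else
    let wanho : Int := pvFst first + pvSnd first
    scores.foldl
      (fun answer p =>
        -- best = highest second score among people with strictly higher first score, floored at 0
        let best := scores.foldl
          (fun b q => if pvFst q > pvFst p ∧ pvSnd q > b then pvSnd q else b) 0
        if best ≤ pvSnd p ∧ wanho < pvFst p + pvSnd p then answer + 1 else answer)
      1

-- ===== PRECONDITION & SPEC =====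
-- Pre_ excludes exactly the inputs on which A raises: the empty list (scores[0] is an
-- IndexError) and inputs with a row that is not a pair, unless the dominance check (which
-- only needs rows of length ≥ 2) returns -1 before the pair unpacking is reached.
def Pre_solution (scores : List (List Int)) : Prop :=
  scores ≠ [] ∧
    ((∀ s ∈ scores, s.length = 2) ∨
      ((∀ s ∈ scores, 2 ≤ s.length) ∧
        ∃ x ∈ scores.drop 1,
          pvFst x > pvFst (scores.headD []) ∧ pvSnd x > pvSnd (scores.headD [])))
instance (scores : List (List Int)) : Decidable (Pre_solution scores) := by
  unfold Pre_solution; infer_instance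

def pvWitness_solution : List (List Int) := [[2, 2], [1, 4], [3, 2], [3, 2], [1, 4]]

def Spec_solution (scores : List (List Int)) (out : Int) : Prop := out = solution_alt scores
instance (scores : List (List Int)) (out : Int) : Decidable (Spec_solution scores out) := by
  unfold Spec_solution; infer_instance

-- ===== CLAIM (what is proved, stated in full; the proofs are below) =====
def Claim_equal_solution : Prop := ∀ (scores : List (List Int)),
  Dom_solution scores → Pre_solution scores → Spec_solution scores (solution scores)

-- ===== LEMMAS AND PROOFS =====

-- the strict lexicographic "comes before" test used by A's sort key (-x[0], x[1])
def pvBf (a b : List Int) : Bool :=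
  decide ((-(pvFst a)) < (-(pvFst b))) || (!decide ((-(pvFst b)) < (-(pvFst a))) && decide (pvSnd a < pvSnd b))

-- the non-strict order that holds pairwise along A's sorted list
def pvR (a b : List Int) : Prop :=
  pvFst b < pvFst a ∨ (pvFst a = pvFst b ∧ pvSnd a ≤ pvSnd b)

-- "p survives A's running-max test": second score ≥ 0 and nobody with a strictly higher
-- first score has a strictly higher second score, phrased over the whole list S
def pvOK (S : List (List Int)) (p : List Int) : Bool :=
  decide (0 ≤ pvSnd p) &&
    S.all (fun q => !decide (pvFst p < pvFst q) || decide (pvSnd q ≤ pvSnd p))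

lemma pv_insertBy_nil (x : List Int) : PySem.List.insertBy pvBf x [] = [x] := rfl

lemma pv_insertBy_cons (x y : List Int) (ys : List (List Int)) :
    PySem.List.insertBy pvBf x (y :: ys) =
      if pvBf x y then x :: y :: ys else y :: PySem.List.insertBy pvBf x ys := rfl

lemma pvBf_iff (a b : List Int) :
    pvBf a b = true ↔ (pvFst b < pvFst a ∨ (pvFst a = pvFst b ∧ pvSnd a < pvSnd b)) := by
  unfold pvBf
  simp only [Bool.or_eq_true, Bool.and_eq_true, Bool.not_eq_eq_eq_not, Bool.not_true,
    decide_eq_true_iff, decide_eq_false_iff_not]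
  omega

lemma pv_trans (x y z : List Int) (h1 : pvBf x y = true) (h2 : pvR y z) : pvR x z := by
  rw [pvBf_iff] at h1; unfold pvR at h2 ⊢; omega

lemma pv_not_bf (x y : List Int) (h : ¬ pvBf x y = true) : pvR y x := by
  rw [pvBf_iff] at h; unfold pvR; omega

lemma pv_insert_pairwise (x : List Int) : ∀ (l : List (List Int)), l.Pairwise pvR →
    (PySem.List.insertBy pvBf x l).Pairwise pvR := by
  intro l
  induction l with
  | nil => intro _; rw [pv_insertBy_nil]; exact List.pairwise_singleton _ _
  | cons y ys ih =>
    intro h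
    rcases List.pairwise_cons.mp h with ⟨hy, hys⟩
    rw [pv_insertBy_cons]
    by_cases hb : pvBf x y = true
    · rw [if_pos hb]
      refine List.pairwise_cons.mpr ⟨?_, h⟩
      intro z hz
      rcases List.mem_cons.mp hz with rfl | hz
      · rw [pvBf_iff] at hb; unfold pvR; omega
      · exact pv_trans x y z hb (hy z hz)
    · rw [if_neg hb]
      refine List.pairwise_cons.mpr ⟨?_, ih hys⟩
      intro z hz
      rcases (PySem.List.mem_insertBy pvBf x z ys).mp hz with heq | hz
      · rw [heq]; exact pv_not_bf x y hb
      · exact hy z hz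

lemma pv_sorted2_eq (scores : List (List Int)) :
    PySem.List.sorted2 scores (fun x => -(pvFst x)) (fun x => pvSnd x)
      = scores.foldl (fun acc x => PySem.List.insertBy pvBf x acc) [] := rfl

lemma pv_foldl_pairwise : ∀ (xs acc : List (List Int)), acc.Pairwise pvR →
    (xs.foldl (fun acc x => PySem.List.insertBy pvBf x acc) acc).Pairwise pvR := by
  intro xs
  induction xs with
  | nil => intro acc h; exact h
  | cons x t ih =>
    intro acc h
    exact ih _ (pv_insert_pairwise x acc h)

lemma pv_sorted2_pairwise (scores : List (List Int)) :
    (PySem.List.sorted2 scores (fun x => -(pvFst x)) (fun x => pvSnd x)).Pairwise pvR := by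
  rw [pv_sorted2_eq]
  exact pv_foldl_pairwise scores [] List.Pairwise.nil

lemma pv_filter_any (l : List (List Int)) (p : List Int → Bool) :
    ((l.filter p).length ≠ 0) ↔ l.any p = true := by
  simp [List.length_eq_zero_iff, List.filter_eq_nil_iff]

-- characterisation of the max-fold
lemma pv_maxfold_le (L : List (List Int)) (c : Int) : ∀ m : Int,
    L.foldl (fun acc q => max acc (pvSnd q)) m ≤ c ↔ (m ≤ c ∧ ∀ q ∈ L, pvSnd q ≤ c) := by
  induction L with
  | nil => simp
  | cons y t ih =>
    intro m
    simp only [List.foldl_cons, ih, List.mem_cons]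
    constructor
    · rintro ⟨h1, h2⟩
      refine ⟨by omega, ?_⟩
      rintro q (rfl | hq)
      · omega
      · exact h2 q hq
    · rintro ⟨h1, h2⟩
      exact ⟨by have := h2 y (Or.inl rfl); omega, fun q hq => h2 q (Or.inr hq)⟩

-- characterisation of B's inner dominator loop
lemma pv_bestfold_le (S : List (List Int)) (p : List Int) (c : Int) : ∀ b : Int,
    S.foldl (fun b q => if pvFst q > pvFst p ∧ pvSnd q > b then pvSnd q else b) b ≤ c ↔
      (b ≤ c ∧ ∀ q ∈ S, pvFst p < pvFst q → pvSnd q ≤ c) := by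
  induction S with
  | nil => simp
  | cons y t ih =>
    intro b
    simp only [List.foldl_cons, List.mem_cons]
    by_cases hy : pvFst y > pvFst p ∧ pvSnd y > b
    · rw [if_pos hy, ih]
      constructor
      · rintro ⟨h1, h2⟩
        refine ⟨by omega, ?_⟩
        rintro q (rfl | hq) _
        · omega
        · exact h2 q hq ‹_›
      · rintro ⟨h1, h2⟩
        exact ⟨h2 y (Or.inl rfl) hy.1, fun q hq => h2 q (Or.inr hq)⟩
    · rw [if_neg hy, ih]
      constructor
      · rintro ⟨h1, h2⟩
        refine ⟨h1, ?_⟩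
        rintro q (rfl | hq) hpq
        · omega
        · exact h2 q hq hpq
      · rintro ⟨h1, h2⟩
        exact ⟨h1, fun q hq => h2 q (Or.inr hq)⟩

lemma pvOK_iff (S : List (List Int)) (p : List Int) :
    pvOK S p = true ↔ (0 ≤ pvSnd p ∧ ∀ q ∈ S, pvFst p < pvFst q → pvSnd q ≤ pvSnd p) := by
  unfold pvOK
  simp only [Bool.and_eq_true, List.all_eq_true, Bool.or_eq_true, Bool.not_eq_eq_eq_not,
    Bool.not_true, decide_eq_true_iff, decide_eq_false_iff_not]
  constructor
  · rintro ⟨h0, hall⟩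
    refine ⟨h0, fun q hq hlt => ?_⟩
    rcases hall q hq with h1 | h1
    · omega
    · exact h1
  · rintro ⟨h0, hall⟩
    refine ⟨h0, fun q hq => ?_⟩
    by_cases hf : pvFst p < pvFst q
    · exact Or.inr (hall q hq hf)
    · exact Or.inl hf

-- B's outer loop counts pvOK ∧ wanho-condition
lemma pv_countB (S : List (List Int)) (w : Int) : ∀ (L : List (List Int)) (a : Int),
    L.foldl
      (fun answer p =>
        let best := S.foldl
          (fun b q => if pvFst q > pvFst p ∧ pvSnd q > b then pvSnd q else b) 0
        if best ≤ pvSnd p ∧ w < pvFst p + pvSnd p then answer + 1 else answer)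
      a
    = a + (L.countP (fun p => pvOK S p && decide (w < pvFst p + pvSnd p)) : Int) := by
  intro L
  induction L with
  | nil => simp
  | cons p t ih =>
    intro a
    simp only [List.foldl_cons, List.countP_cons]
    have hbest : (S.foldl (fun b q => if pvFst q > pvFst p ∧ pvSnd q > b then pvSnd q else b) 0
        ≤ pvSnd p ∧ w < pvFst p + pvSnd p)
        ↔ (pvOK S p && decide (w < pvFst p + pvSnd p)) = true := by
      rw [pv_bestfold_le, Bool.and_eq_true, pvOK_iff, decide_eq_true_iff]
    by_cases hc : (pvOK S p && decide (w < pvFst p + pvSnd p)) = true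
    · rw [if_pos (hbest.mpr hc), ih, if_pos hc]
      push_cast; ring
    · rw [if_neg (fun h => hc (hbest.mp h)), ih, if_neg hc]
      push_cast; ring

-- the key step: at the head of the remaining sorted suffix, "running max ≤ second score"
-- is exactly the global pvOK predicate
lemma pv_head_ok (S pre t : List (List Int)) (y : List Int)
    (hS : S = pre ++ y :: t) (hp : S.Pairwise pvR) :
    (pre.foldl (fun acc q => max acc (pvSnd q)) 0 ≤ pvSnd y) ↔ pvOK S y = true := by
  subst hS
  rw [pv_maxfold_le, pvOK_iff]
  rw [List.pairwise_append] at hp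
  obtain ⟨hpre, hyt, hcross⟩ := hp
  have hyt' : ∀ q ∈ t, pvR y q := (List.pairwise_cons.mp hyt).1
  constructor
  · rintro ⟨h0, hall⟩
    refine ⟨h0, ?_⟩
    intro q hq hlt
    rcases List.mem_append.mp hq with hq | hq
    · exact hall q hq
    · rcases List.mem_cons.mp hq with rfl | hq
      · omega
      · rcases hyt' q hq with h | h <;> [omega; omega]
  · rintro ⟨h0, hall⟩
    refine ⟨h0, ?_⟩
    intro q hq
    rcases hcross q hq y (List.mem_cons_self) with h | h
    · exact hall q (List.mem_append.mpr (Or.inl hq)) h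
    · omega

-- A's sorted running-max loop counts the same predicate
lemma pv_countA (S : List (List Int)) (w : Int) : ∀ (L pre : List (List Int)) (a : Int),
    S = pre ++ L → S.Pairwise pvR →
    (L.foldl
      (fun (st : Int × Int) s =>
        if st.2 ≤ pvSnd s then
          (if w < pvFst s + pvSnd s then st.1 + 1 else st.1, pvSnd s)
        else st)
      (a, pre.foldl (fun acc q => max acc (pvSnd q)) 0)).1
    = a + (L.countP (fun p => pvOK S p && decide (w < pvFst p + pvSnd p)) : Int) := by
  intro L
  induction L with
  | nil => simp
  | cons y t ih =>
    intro pre a hS hp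
    have hok := pv_head_ok S pre t y hS hp
    have happ : (pre ++ [y]).foldl (fun acc q => max acc (pvSnd q)) 0
        = max (pre.foldl (fun acc q => max acc (pvSnd q)) 0) (pvSnd y) := by
      rw [List.foldl_append]; rfl
    have hS' : S = (pre ++ [y]) ++ t := by simp [hS]
    simp only [List.foldl_cons, List.countP_cons]
    by_cases hm : pre.foldl (fun acc q => max acc (pvSnd q)) 0 ≤ pvSnd y
    · rw [if_pos hm]
      have hstep := ih (pre ++ [y]) (if w < pvFst y + pvSnd y then a + 1 else a) hS' hp
      rw [happ, max_eq_right hm] at hstep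
      rw [hstep]
      have hokt : pvOK S y = true := hok.mp hm
      by_cases hw : w < pvFst y + pvSnd y
      · rw [if_pos hw, if_pos (by rw [Bool.and_eq_true, decide_eq_true_iff]; exact ⟨hokt, hw⟩)]
        push_cast; ring
      · rw [if_neg hw, if_neg (by rw [Bool.and_eq_true, decide_eq_true_iff]; tauto)]
        push_cast; omega
    · rw [if_neg hm]
      have hstep := ih (pre ++ [y]) a hS' hp
      rw [happ, max_eq_left (by omega)] at hstep
      rw [hstep]
      have hokf : ¬ (pvOK S y = true) := fun h => hm (hok.mpr h)
      rw [if_neg (by rw [Bool.and_eq_true]; tauto)]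
      push_cast; ring

-- ===== VERDICT (by name: the statement is the Claim_ definition above) =====
theorem solution_spec : Claim_equal_solution := by
  intro scores _ _
  unfold Spec_solution solution solution_alt
  by_cases hc : ((scores.drop 1).filter
      (fun x => decide (pvFst x > pvFst (scores.headD [])) &&
                decide (pvSnd x > pvSnd (scores.headD [])))).length ≠ 0
  · rw [if_pos hc, if_pos ((pv_filter_any _ _).mp hc)]
  · rw [if_neg hc, if_neg (fun h => hc ((pv_filter_any _ _).mpr h))]
    set w : Int := pvFst (scores.headD []) + pvSnd (scores.headD []) with hw
    set S := PySem.List.sorted2 scores (fun x => -(pvFst x)) (fun x => pvSnd x) with hSdef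
    have hperm : S.Perm scores := PySem.List.sorted2_perm scores _ _ false
    have hA := pv_countA S w S [] 1 rfl (pv_sorted2_pairwise scores)
    simp only [List.foldl_nil] at hA
    rw [hA, pv_countB scores w scores 1]
    have hOK : ∀ p, pvOK S p = pvOK scores p := by
      intro p
      rw [Bool.eq_iff_iff, pvOK_iff, pvOK_iff]
      constructor
      · rintro ⟨h0, h1⟩; exact ⟨h0, fun q hq => h1 q (hperm.mem_iff.mpr hq)⟩
      · rintro ⟨h0, h1⟩; exact ⟨h0, fun q hq => h1 q (hperm.mem_iff.mp hq)⟩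
    rw [List.countP_congr (fun p _ => by rw [hOK p]), hperm.countP_eq]
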